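-- pv_equiv track=rewrite | github.com/IamMayankThakur/automated-assignment-evaluation | evalmgr/media/source/api_test/CC_1543_1565_1624_w9iaU4t.py | checksha
-- ===== SOURCE A (Python) =====
-- shalist=['0','1','2','3','4','5','6','7','8','9','a','b','c','d','e','f']
--
-- def checksha(string):
-- 	if(len(string)!=40):
-- 		return True
-- 	else:
-- 		for i in list(string):
-- 			if i not in shalist:
-- 				return True
-- 	return False
-- ===== SOURCE B (Python) =====
-- import re
--
-- def checksha(string):
--     return re.fullmatch(r'[0-9a-f]{40}', string) is None
-- ===== Notes on version B (the rewrite author's own statement) =====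
-- stated objective: idiomatic
-- what changed: Replaced the length check plus per-character membership loop over a 16-element list with a single regex fullmatch of [0-9a-f]{40}, whose {40} quantifier enforces the exact length and character class the hex digits.
import Mathlib
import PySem

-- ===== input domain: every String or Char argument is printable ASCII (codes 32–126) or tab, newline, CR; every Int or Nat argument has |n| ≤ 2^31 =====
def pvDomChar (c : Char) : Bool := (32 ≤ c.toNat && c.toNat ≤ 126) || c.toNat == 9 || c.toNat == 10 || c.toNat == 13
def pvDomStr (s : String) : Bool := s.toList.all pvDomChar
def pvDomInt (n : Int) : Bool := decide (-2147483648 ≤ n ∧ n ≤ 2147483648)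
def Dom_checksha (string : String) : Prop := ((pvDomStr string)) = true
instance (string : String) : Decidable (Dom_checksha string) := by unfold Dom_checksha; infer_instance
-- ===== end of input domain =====

-- B replaces A's length check plus per-character membership loop with one regex fullmatch
-- of [0-9a-f]{40} (more idiomatic; same behaviour, same cost).

-- ===== PORT A =====
-- module-level constant shalist
def shalist : List Char :=
  ['0','1','2','3','4','5','6','7','8','9','a','b','c','d','e','f']

-- the for-loop over list(string) with its early 'return True'
def checkshaLoop : List Char → Bool
  | [] => false
  | i :: rest => if shalist.contains i = false then true else checkshaLoop rest

def checksha (string : String) : Bool :=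
  if string.toList.length ≠ 40 then true
  else checkshaLoop string.toList

-- ===== PORT B =====
-- Source B uses re.fullmatch(r'[0-9a-f]{40}', string) is None.  PySem has no regex engine, so the
-- pattern is ported by hand, exactly for this pattern: fullmatch of [0-9a-f]{40} succeeds iff
-- the string has exactly 40 characters, each in the class [0-9a-f]; B returns True iff it fails.
def hexClassChar (c : Char) : Bool :=
  ('0' ≤ c && c ≤ '9') || ('a' ≤ c && c ≤ 'f')

def checksha_alt (string : String) : Bool :=
  !(string.toList.length == 40 && string.toList.all hexClassChar)

-- ===== PRECONDITION & SPEC =====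
def Spec_checksha (string : String) (out : Bool) : Prop := out = checksha_alt string
instance (string : String) (out : Bool) : Decidable (Spec_checksha string out) := by unfold Spec_checksha; infer_instance

-- ===== CLAIM (what is proved, stated in full; the proofs are below) =====
def Claim_equal_checksha : Prop := ∀ (string : String), Dom_checksha string → Spec_checksha string (checksha string)

-- ===== LEMMAS AND PROOFS =====

theorem contains_shalist_iff (c : Char) : shalist.contains c = hexClassChar c := by
  apply Bool.eq_iff_iff.mpr
  simp only [shalist, hexClassChar, List.contains_eq_mem, List.mem_cons, List.not_mem_nil,
    or_false, decide_eq_true_eq, Bool.or_eq_true, Bool.and_eq_true, Char.ext_iff,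
    Char.le_def, UInt32.le_iff_toNat_le, UInt32.ext_iff,
    show '0'.val.toNat = 48 from rfl, show '1'.val.toNat = 49 from rfl, show '2'.val.toNat = 50 from rfl, show '3'.val.toNat = 51 from rfl, show '4'.val.toNat = 52 from rfl, show '5'.val.toNat = 53 from rfl, show '6'.val.toNat = 54 from rfl, show '7'.val.toNat = 55 from rfl, show '8'.val.toNat = 56 from rfl, show '9'.val.toNat = 57 from rfl, show 'a'.val.toNat = 97 from rfl, show 'b'.val.toNat = 98 from rfl, show 'c'.val.toNat = 99 from rfl, show 'd'.val.toNat = 100 from rfl, show 'e'.val.toNat = 101 from rfl, show 'f'.val.toNat = 102 from rfl]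
  omega

theorem loop_eq_not_all (l : List Char) : checkshaLoop l = !l.all hexClassChar := by
  induction l with
  | nil => rfl
  | cons c rest ih =>
    simp only [checkshaLoop, List.all_cons, contains_shalist_iff]
    cases h : hexClassChar c <;> simp [ih]

-- ===== VERDICT (by name: the statement is the Claim_ definition above) =====
theorem checksha_spec : Claim_equal_checksha := by
  intro s _
  unfold Spec_checksha checksha checksha_alt
  rw [loop_eq_not_all]
  by_cases h : s.toList.length = 40
  · rw [if_neg (by simp [h]), h, show ((40 : Nat) == 40) = true from rfl, Bool.true_and]
  · rw [if_pos h]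
    have hb : (s.toList.length == 40) = false := beq_eq_false_iff_ne.mpr h
    rw [hb, Bool.false_and, Bool.not_false]
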